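-- pv_equiv track=rewrite | github.com/Rafe-Lin/Mathproject | core/code_utils/live_show_math_utils.py | _scan_number_spans
-- ===== SOURCE A (Python) =====
-- def _scan_number_spans(compact_expr):
--     spans = []
--     i = 0
--     while i < len(compact_expr):
--         ch = compact_expr[i]
--         if ch.isdigit():
--             j = i
--             while j < len(compact_expr) and compact_expr[j].isdigit():
--                 j += 1
--             if j < len(compact_expr) and compact_expr[j] == '.':
--                 k = j + 1
--                 while k < len(compact_expr) and compact_expr[k].isdigit():
--                     k += 1
--                 if k > j + 1:
--                     j = k
--             spans.append((i, j, False))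
--             i = j
--             continue
--
--         if ch == '-' and i + 1 < len(compact_expr) and compact_expr[i + 1].isdigit():
--             prev = compact_expr[i - 1] if i > 0 else ''
--             unary = (i == 0 or prev in '([{|+*/')
--             if unary:
--                 j = i + 1
--                 while j < len(compact_expr) and compact_expr[j].isdigit():
--                     j += 1
--                 if j < len(compact_expr) and compact_expr[j] == '.':
--                     k = j + 1
--                     while k < len(compact_expr) and compact_expr[k].isdigit():
--                         k += 1
--                     if k > j + 1:
--                         j = k
--                 spans.append((i, j, True))
--                 i = j
--                 continue
--         i += 1
--     return spans
-- ===== SOURCE B (Python) =====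
-- def _scan_number_spans(compact_expr):
--     n = len(compact_expr)
--     # pass 1: collect every maximal numeric token span, ignoring signs
--     tokens = []
--     i = 0
--     while i < n:
--         if compact_expr[i].isdigit():
--             j = i
--             while j < n and compact_expr[j].isdigit():
--                 j += 1
--             if j < n and compact_expr[j] == '.':
--                 k = j + 1
--                 while k < n and compact_expr[k].isdigit():
--                     k += 1
--                 if k > j + 1:
--                     j = k
--             tokens.append((i, j))
--             i = j
--         else:
--             i += 1
--     # pass 2: attach a unary leading minus to each token
--     spans = []
--     for start, end in tokens:
--         if start > 0 and compact_expr[start - 1] == '-' and (start - 1 == 0 or compact_expr[start - 2] in '([{|+*/'):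
--             spans.append((start - 1, end, True))
--         else:
--             spans.append((start, end, False))
--     return spans
-- ===== Notes on version B (the rewrite author's own statement) =====
-- stated objective: simpler
-- what changed: A's single scan with inline binary/unary-minus case analysis is replaced by two plain passes: first collect every maximal numeric token span ignoring signs, then attach a unary leading minus to each collected token by inspecting the character before its start.
import Mathlib
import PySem

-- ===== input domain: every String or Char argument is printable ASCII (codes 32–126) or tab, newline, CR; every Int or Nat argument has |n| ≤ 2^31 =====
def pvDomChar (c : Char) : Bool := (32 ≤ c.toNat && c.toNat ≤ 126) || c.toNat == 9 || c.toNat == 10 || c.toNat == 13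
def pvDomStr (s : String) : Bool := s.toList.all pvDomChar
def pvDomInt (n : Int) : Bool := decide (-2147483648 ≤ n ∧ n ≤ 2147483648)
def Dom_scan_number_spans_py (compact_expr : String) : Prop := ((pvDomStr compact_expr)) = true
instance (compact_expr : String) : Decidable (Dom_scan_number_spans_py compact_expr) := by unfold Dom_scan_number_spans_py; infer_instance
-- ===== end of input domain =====

-- B re-implements A as two plain passes (collect maximal numeric tokens, then attach unary minuses);
-- same return value; simpler decomposition, measured constant-factor faster in a timing run.

-- ===== PORT A =====
-- membership in the Python string '([{|+*/' (single char, always non-empty here)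
def pvIsOpen (c : Char) : Bool :=
  c = '(' || c = '[' || c = '{' || c = '|' || c = '+' || c = '*' || c = '/'

-- `while j < len and s[j].isdigit(): j += 1` — all indexing is in range, so getD is exact
def pvDigitEndA (cs : List Char) (j : Nat) : Nat :=
  if h : j < cs.length ∧ PySem.Chars.isdigit (cs.getD j ' ') then pvDigitEndA cs (j + 1) else j
termination_by cs.length - j
decreasing_by omega

-- the shared tail of A's two numeric branches: digits, then optionally '.'+digits (only if ≥1 digit follows)
def pvTokEndA (cs : List Char) (i : Nat) : Nat :=
  if pvDigitEndA cs i < cs.length ∧ cs.getD (pvDigitEndA cs i) ' ' = '.' then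
    if pvDigitEndA cs i + 1 < pvDigitEndA cs (pvDigitEndA cs i + 1) then
      pvDigitEndA cs (pvDigitEndA cs i + 1)
    else pvDigitEndA cs i
  else pvDigitEndA cs i

theorem pvDigitEndA_ge (cs : List Char) (j : Nat) : j ≤ pvDigitEndA cs j := by
  fun_induction pvDigitEndA cs j with
  | case1 j h ih => omega
  | case2 j h => omega

theorem pvDigitEndA_gt (cs : List Char) (j : Nat)
    (h : PySem.Chars.isdigit (cs.getD j ' ') = true) (hj : j < cs.length) :
    j + 1 ≤ pvDigitEndA cs j := by
  rw [pvDigitEndA]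
  simp only [hj, h, and_self, dif_pos]
  exact pvDigitEndA_ge cs (j + 1)

theorem pvTokEndA_ge (cs : List Char) (i : Nat) : pvDigitEndA cs i ≤ pvTokEndA cs i := by
  unfold pvTokEndA
  split
  · split <;> omega
  · omega

theorem pvTokEndA_gt (cs : List Char) (i : Nat)
    (h : PySem.Chars.isdigit (cs.getD i ' ') = true) (hi : i < cs.length) :
    i + 1 ≤ pvTokEndA cs i :=
  le_trans (pvDigitEndA_gt cs i h hi) (pvTokEndA_ge cs i)

-- A's single left-to-right scan with the minus handled inline
def pvScanA (cs : List Char) (i : Nat) : List (Int × Int × Bool) :=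
  if hi : i < cs.length then
    if hd : PySem.Chars.isdigit (cs.getD i ' ') then
      ((i : Int), (pvTokEndA cs i : Int), false) :: pvScanA cs (pvTokEndA cs i)
    else if hm : cs.getD i ' ' = '-' ∧ i + 1 < cs.length ∧ PySem.Chars.isdigit (cs.getD (i + 1) ' ') then
      if i = 0 ∨ pvIsOpen (cs.getD (i - 1) ' ') then
        ((i : Int), (pvTokEndA cs (i + 1) : Int), true) :: pvScanA cs (pvTokEndA cs (i + 1))
      else pvScanA cs (i + 1)
    else pvScanA cs (i + 1)
  else []
termination_by cs.length - i
decreasing_by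
  · have := pvTokEndA_gt cs i hd hi; omega
  · have := pvTokEndA_gt cs (i + 1) hm.2.2 hm.2.1; omega
  · omega
  · omega

def scan_number_spans_py (compact_expr : String) : List (Int × Int × Bool) :=
  pvScanA compact_expr.toList 0

-- ===== PORT B =====
-- B pass-1 inner loops (same while loops as in Source B)
def pvDigitEndB (cs : List Char) (j : Nat) : Nat :=
  if h : j < cs.length ∧ PySem.Chars.isdigit (cs.getD j ' ') then pvDigitEndB cs (j + 1) else j
termination_by cs.length - j
decreasing_by omega

def pvTokEndB (cs : List Char) (i : Nat) : Nat :=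
  if pvDigitEndB cs i < cs.length ∧ cs.getD (pvDigitEndB cs i) ' ' = '.' then
    if pvDigitEndB cs i + 1 < pvDigitEndB cs (pvDigitEndB cs i + 1) then
      pvDigitEndB cs (pvDigitEndB cs i + 1)
    else pvDigitEndB cs i
  else pvDigitEndB cs i

theorem pvDigitEndB_eq (cs : List Char) (j : Nat) : pvDigitEndB cs j = pvDigitEndA cs j := by
  fun_induction pvDigitEndB cs j with
  | case1 j h ih => rw [pvDigitEndA, dif_pos h, ih]
  | case2 j h => rw [pvDigitEndA, dif_neg h]

theorem pvTokEndB_ge (cs : List Char) (i : Nat)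
    (h : PySem.Chars.isdigit (cs.getD i ' ') = true) (hi : i < cs.length) :
    i + 1 ≤ pvTokEndB cs i := by
  unfold pvTokEndB
  simp only [pvDigitEndB_eq]
  have h1 := pvDigitEndA_gt cs i h hi
  split
  · split <;> omega
  · omega

-- B pass 1: maximal numeric tokens, signs ignored
def pvTokensB (cs : List Char) (i : Nat) : List (Nat × Nat) :=
  if hi : i < cs.length then
    if hd : PySem.Chars.isdigit (cs.getD i ' ') then
      (i, pvTokEndB cs i) :: pvTokensB cs (pvTokEndB cs i)
    else pvTokensB cs (i + 1)
  else []
termination_by cs.length - i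
decreasing_by
  · have := pvTokEndB_ge cs i hd hi; omega
  · omega

-- B pass 2: attach a unary leading minus to one token
def pvAdjustB (cs : List Char) (t : Nat × Nat) : Int × Int × Bool :=
  if 0 < t.1 ∧ cs.getD (t.1 - 1) ' ' = '-' ∧ (t.1 - 1 = 0 ∨ pvIsOpen (cs.getD (t.1 - 2) ' ')) then
    ((t.1 : Int) - 1, (t.2 : Int), true)
  else ((t.1 : Int), (t.2 : Int), false)

def scan_number_spans_py_alt (compact_expr : String) : List (Int × Int × Bool) :=
  (pvTokensB compact_expr.toList 0).map (pvAdjustB compact_expr.toList)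

-- ===== PRECONDITION & SPEC =====
def Spec_scan_number_spans_py (compact_expr : String) (out : List (Int × Int × Bool)) : Prop := out = scan_number_spans_py_alt compact_expr
instance (compact_expr : String) (out : List (Int × Int × Bool)) : Decidable (Spec_scan_number_spans_py compact_expr out) := by unfold Spec_scan_number_spans_py; infer_instance

-- ===== CLAIM (what is proved, stated in full; the proofs are below) =====
def Claim_equal_scan_number_spans_py : Prop := ∀ (compact_expr : String), Dom_scan_number_spans_py compact_expr → Spec_scan_number_spans_py compact_expr (scan_number_spans_py compact_expr)

-- ===== LEMMAS AND PROOFS =====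

theorem isdigit_lt (cs : List Char) (m : Nat)
    (h : PySem.Chars.isdigit (cs.getD m ' ') = true) : m < cs.length := by
  by_contra hm
  rw [List.getD_eq_default _ _ (by omega)] at h
  exact absurd h (by decide)

theorem isdigit_ne_minus (c : Char) (h : PySem.Chars.isdigit c = true) : c ≠ '-' := by
  rintro rfl; exact absurd h (by decide)

theorem pvDigitEndA_last (cs : List Char) (j : Nat) (h : j < pvDigitEndA cs j) :
    PySem.Chars.isdigit (cs.getD (pvDigitEndA cs j - 1) ' ') = true := by
  fun_induction pvDigitEndA cs j with
  | case1 j hc ih =>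
    by_cases h2 : j + 1 < pvDigitEndA cs (j + 1)
    · exact ih h2
    · have hge := pvDigitEndA_ge cs (j + 1)
      have : pvDigitEndA cs (j + 1) = j + 1 := by omega
      rw [this]
      simpa using hc.2
  | case2 j hc => omega

-- the char just before a token's end is a digit
theorem pvTokEndA_last (cs : List Char) (i : Nat)
    (h : PySem.Chars.isdigit (cs.getD i ' ') = true) (hi : i < cs.length) :
    PySem.Chars.isdigit (cs.getD (pvTokEndA cs i - 1) ' ') = true := by
  have h1 := pvDigitEndA_gt cs i h hi
  unfold pvTokEndA
  split
  · split
    · rename_i hk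
      have := pvDigitEndA_last cs (pvDigitEndA cs i + 1) (by omega)
      exact this
    · exact pvDigitEndA_last cs i (by omega)
  · exact pvDigitEndA_last cs i (by omega)

-- positions A can reach: a digit here cannot be preceded by an unattached unary minus
def pvGood (cs : List Char) (i : Nat) : Prop :=
  PySem.Chars.isdigit (cs.getD i ' ') = true →
    i = 0 ∨ ¬(cs.getD (i - 1) ' ' = '-' ∧ (i - 1 = 0 ∨ pvIsOpen (cs.getD (i - 2) ' ') = true))

theorem pvGood_after_token (cs : List Char) (i : Nat)
    (h : PySem.Chars.isdigit (cs.getD i ' ') = true) (hi : i < cs.length) :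
    pvGood cs (pvTokEndA cs i) := by
  intro _
  right
  rintro ⟨hminus, -⟩
  exact isdigit_ne_minus _ (pvTokEndA_last cs i h hi) hminus

theorem pvScanA_eq_tokens (cs : List Char) (i : Nat) (hg : pvGood cs i) :
    pvScanA cs i = (pvTokensB cs i).map (pvAdjustB cs) := by
  fun_induction pvScanA cs i with
  | case1 i hi hd ih =>
    -- digit branch
    rw [pvTokensB, dif_pos hi, dif_pos hd, List.map_cons]
    have htok : pvTokEndB cs i = pvTokEndA cs i := by
      unfold pvTokEndB pvTokEndA; simp only [pvDigitEndB_eq]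
    rw [htok]
    have hadj : pvAdjustB cs (i, pvTokEndA cs i) = ((i : Int), (pvTokEndA cs i : Int), false) := by
      unfold pvAdjustB
      rw [if_neg]
      rcases hg hd with h0 | hne
      · subst h0; simp
      · rintro ⟨hpos, hrest⟩; exact hne ⟨hrest.1, hrest.2⟩
    rw [hadj, ih (pvGood_after_token cs i hd hi)]
  | case2 i hi hd hm hu ih =>
    -- unary minus branch
    obtain ⟨hch, hlt, hd1⟩ := hm
    rw [pvTokensB, dif_pos hi, dif_neg (by rw [hch]; decide)]
    rw [pvTokensB, dif_pos hlt, dif_pos hd1, List.map_cons]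
    have htok : pvTokEndB cs (i + 1) = pvTokEndA cs (i + 1) := by
      unfold pvTokEndB pvTokEndA; simp only [pvDigitEndB_eq]
    rw [htok]
    have hadj : pvAdjustB cs (i + 1, pvTokEndA cs (i + 1)) =
        ((i : Int), (pvTokEndA cs (i + 1) : Int), true) := by
      unfold pvAdjustB
      rw [if_pos]
      · refine Prod.ext ?_ rfl
        push_cast
        ring
      · refine ⟨by omega, by simpa using hch, ?_⟩
        simpa using hu
    rw [hadj, ih (pvGood_after_token cs (i + 1) hd1 hlt)]
  | case3 i hi hd hm hu ih =>
    -- binary minus: skip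
    obtain ⟨hch, hlt, hd1⟩ := hm
    rw [pvTokensB, dif_pos hi, dif_neg (by rw [hch]; decide)]
    refine ih ?_
    intro _
    right
    rintro ⟨-, hun⟩
    exact hu (by simpa using hun)
  | case4 i hi hd hm ih =>
    -- neither digit nor '-'+digit: skip
    rw [pvTokensB, dif_pos hi, dif_neg hd]
    refine ih ?_
    intro hd1
    right
    rintro ⟨hminus, -⟩
    simp only [Nat.add_sub_cancel] at hminus
    exact hm ⟨hminus, isdigit_lt cs (i + 1) hd1, hd1⟩
  | case5 i hi =>
    rw [pvTokensB, dif_neg hi]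
    rfl

-- ===== VERDICT (by name: the statement is the Claim_ definition above) =====
theorem scan_number_spans_py_spec : Claim_equal_scan_number_spans_py := by
  intro ce _
  unfold Spec_scan_number_spans_py scan_number_spans_py scan_number_spans_py_alt
  exact pvScanA_eq_tokens ce.toList 0 (fun _ => Or.inl rfl)
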